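-- pv_equiv track=rewrite | github.com/tjuyuxinzhang/A11yScan-mobile | ExplorDetector/fuzz/findTextFromUI.py | get_basic_info
-- ===== SOURCE A (Python) =====
-- def get_basic_info(e_component: dict):
--     key_list = ['id', 'text', 'label', 'text-hint', 'app_name']
--     key_at_list = ['resource-id', 'text', 'label', 'content-desc', 'package']
--     dict_info = {}
--
--     for i in range(len(key_list)):
--         dict_info[key_list[i]] = None
--         for e_property in e_component:
--             if key_at_list[i] in e_property.lower():
--                 dict_info[key_list[i]] = e_component[e_property]
--                 break
--     return dict_info
-- ===== SOURCE B (Python) =====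
-- def get_basic_info(e_component: dict):
--     key_list = ['id', 'text', 'label', 'text-hint', 'app_name']
--     key_at_list = ['resource-id', 'text', 'label', 'content-desc', 'package']
--     found = {}
--     for e_property, value in e_component.items():
--         low = e_property.lower()
--         for pat in key_at_list:
--             if pat not in found and pat in low:
--                 found[pat] = value
--     return {k: found.get(pat) for k, pat in zip(key_list, key_at_list)}
-- ===== Notes on version B (the rewrite author's own statement) =====
-- stated objective: alternative
-- what changed: Replaces A's five independent scans of the properties (one per output key, each re-lowercasing every property name) with a single pass over the properties that lowercases each name once and fills each of the five output slots at its first matching property.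
import Mathlib
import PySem

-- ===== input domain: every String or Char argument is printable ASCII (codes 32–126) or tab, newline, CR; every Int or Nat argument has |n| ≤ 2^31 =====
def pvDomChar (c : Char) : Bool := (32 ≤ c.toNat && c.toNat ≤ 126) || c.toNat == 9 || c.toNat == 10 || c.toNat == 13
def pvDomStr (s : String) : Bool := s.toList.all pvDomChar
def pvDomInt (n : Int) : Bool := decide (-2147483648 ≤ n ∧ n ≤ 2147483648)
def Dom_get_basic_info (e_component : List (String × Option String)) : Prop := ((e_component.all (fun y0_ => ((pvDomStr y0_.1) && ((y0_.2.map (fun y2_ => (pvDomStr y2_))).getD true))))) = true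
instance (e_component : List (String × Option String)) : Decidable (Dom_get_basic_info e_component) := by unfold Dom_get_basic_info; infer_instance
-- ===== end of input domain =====

-- B makes one pass over the properties (tracking which output keys are filled) instead of A's five independent scans; objective: alternative (same O(n) cost, lower() computed once per property).


-- The five output keys and the five patterns searched for (key_list / key_at_list in both Pythons)
def pvKeys : List String := ["id", "text", "label", "text-hint", "app_name"]
def pvPats : List String := ["resource-id", "text", "label", "content-desc", "package"]
-- the test both Pythons perform: 'pat in e_property.lower()'
def pvMatch (pat k : String) : Bool := PySem.Str.isIn pat (PySem.Str.lower k)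

-- ===== PORT A =====
-- inner loop of A: 'for e_property in e_component: if pat in e_property.lower(): … = e_component[e_property]; break'
-- (some v = the looked-up value at the first matching property; none = the loop fell through).
-- The lookup d.getD k none is Python's e_component[e_property]: k is a key of d, so the default is never taken.
def pvInnerA (d : PySem.Dict String (Option String)) (pat : String) :
    List (String × Option String) → Option (Option String)
  | [] => none
  | (k, _) :: rest =>
      if pvMatch pat k then some (d.getD k none) else pvInnerA d pat rest

def get_basic_info (e_component : List (String × Option String)) : List (String × Option String) :=
  -- the parameter is a Python dict: normalize the association list to one (first-occurrence order, last value wins)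
  let d := PySem.Dict.ofList e_component
  -- 'for i in range(len(key_list))', iterating the two parallel literal lists
  ((pvKeys.zip pvPats).foldl
    (fun acc kp =>
      let acc := acc.insert kp.1 none          -- dict_info[key_list[i]] = None
      match pvInnerA d kp.2 d.items with       -- inner for-loop with break
      | some v => acc.insert kp.1 v
      | none => acc)
    PySem.Dict.empty).items

-- ===== PORT B =====
-- one property processed: 'for pat in key_at_list: if pat not in found and pat in low: found[pat] = value'
def pvStepB (found : PySem.Dict String (Option String)) (k : String) (v : Option String) :
    PySem.Dict String (Option String) :=
  pvPats.foldl
    (fun f pat =>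
      if f.contains pat = false ∧ pvMatch pat k = true then f.insert pat v else f)
    found

def get_basic_info_alt (e_component : List (String × Option String)) : List (String × Option String) :=
  let d := PySem.Dict.ofList e_component
  -- single pass: 'for e_property, value in e_component.items(): …'
  let found := d.items.foldl (fun f p => pvStepB f p.1 p.2) PySem.Dict.empty
  -- '{k: found.get(pat) for k, pat in zip(key_list, key_at_list)}' — five fresh distinct keys, so the dict IS this list
  (pvKeys.zip pvPats).map (fun kp => (kp.1, found.getD kp.2 none))

-- ===== PRECONDITION & SPEC =====
def Spec_get_basic_info (e_component : List (String × Option String)) (out : List (String × Option String)) : Prop := out = get_basic_info_alt e_component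
instance (e_component : List (String × Option String)) (out : List (String × Option String)) : Decidable (Spec_get_basic_info e_component out) := by unfold Spec_get_basic_info; infer_instance

-- ===== CLAIM (what is proved, stated in full; the proofs are below) =====
def Claim_equal_get_basic_info : Prop := ∀ (e_component : List (String × Option String)), Dom_get_basic_info e_component → Spec_get_basic_info e_component (get_basic_info e_component)

-- ===== LEMMAS AND PROOFS =====

-- reference first-match function: value of the first property whose lowercased name contains pat
def pvFirst (pat : String) : List (String × Option String) → Option (Option String)
  | [] => none
  | (k, v) :: rest =>
      if pvMatch pat k then some v else pvFirst pat rest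

theorem pvInnerA_eq_pvFirst (d : PySem.Dict String (Option String)) (pat : String)
    (props : List (String × Option String)) (hnd : d.keys.Nodup)
    (hsub : ∀ p ∈ props, p ∈ d.items) :
    pvInnerA d pat props = pvFirst pat props := by
  induction props with
  | nil => rfl
  | cons p rest ih =>
      obtain ⟨k, v⟩ := p
      simp only [pvInnerA, pvFirst]
      by_cases h : pvMatch pat k = true
      · rw [if_pos h, if_pos h]
        have hm : (k, v) ∈ d.items := hsub _ (List.mem_cons_self ..)
        rw [PySem.Dict.getD_of_mem_items d hm hnd]
      · rw [if_neg h, if_neg h]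
        exact ih (fun q hq => hsub q (List.mem_cons_of_mem _ hq))

-- inserts at keys outside ps leave get? unchanged
theorem pvCondFold_get?_notmem (ps : List String) (found : PySem.Dict String (Option String))
    (k : String) (v : Option String) (pat : String) (h : pat ∉ ps) :
    (ps.foldl
      (fun f q => if f.contains q = false ∧ pvMatch q k = true then f.insert q v else f)
      found).get? pat = found.get? pat := by
  induction ps generalizing found with
  | nil => rfl
  | cons q rest ih =>
      have hne : pat ≠ q := fun hh => h (hh ▸ List.mem_cons_self ..)
      simp only [List.foldl_cons]
      rw [ih _ (fun hm => h (List.mem_cons_of_mem _ hm))]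
      split_ifs with hc
      · exact PySem.Dict.get?_insert_of_ne found v hne
      · rfl

-- what one pass of B's inner pattern loop does to the entry of a pattern pat ∈ ps (ps without repeats)
theorem pvCondFold_get? (ps : List String) (hnd : ps.Nodup)
    (found : PySem.Dict String (Option String)) (k : String) (v : Option String)
    (pat : String) (hmem : pat ∈ ps) :
    (ps.foldl
      (fun f q => if f.contains q = false ∧ pvMatch q k = true then f.insert q v else f)
      found).get? pat =
      if found.contains pat = false ∧ pvMatch pat k = true
      then some v else found.get? pat := by
  induction ps generalizing found with
  | nil => cases hmem
  | cons q rest ih =>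
      rcases List.mem_cons.mp hmem with rfl | hmem'
      · simp only [List.foldl_cons]
        have hnin : pat ∉ rest := (List.nodup_cons.mp hnd).1
        rw [pvCondFold_get?_notmem rest _ k v pat hnin]
        split_ifs with hc
        · exact PySem.Dict.get?_insert_self found pat v
        · rfl
      · have hne : pat ≠ q := fun hh =>
          (List.nodup_cons.mp hnd).1 (hh ▸ hmem')
        simp only [List.foldl_cons]
        rw [ih (List.nodup_cons.mp hnd).2 _ hmem']
        have hg : ∀ f1 : PySem.Dict String (Option String),
            f1 = (if found.contains q = false ∧ pvMatch q k = true then found.insert q v else found) →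
            f1.get? pat = found.get? pat ∧ f1.contains pat = found.contains pat := by
          intro f1 hf1
          subst hf1
          split_ifs with hc
          · exact ⟨PySem.Dict.get?_insert_of_ne found v hne, by
              rw [PySem.Dict.contains_insert found q pat v]
              simp [beq_eq_false_iff_ne.mpr hne]⟩
          · exact ⟨rfl, rfl⟩
        obtain ⟨h1, h2⟩ := hg _ rfl
        rw [h1, h2]

-- B's whole pass: the entry of pat is its old value if present, else the first match in the remaining properties
theorem pvFoldB_get? (props : List (String × Option String))
    (found : PySem.Dict String (Option String)) (pat : String) (hmem : pat ∈ pvPats) :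
    (props.foldl (fun f p => pvStepB f p.1 p.2) found).get? pat =
      match found.get? pat with
      | some w => some w
      | none => pvFirst pat props := by
  induction props generalizing found with
  | nil => cases h : found.get? pat <;> simp [pvFirst, h]
  | cons p rest ih =>
      obtain ⟨k, v⟩ := p
      simp only [List.foldl_cons]
      rw [ih (pvStepB found k v)]
      rw [show pvStepB found k v = pvPats.foldl
        (fun f q => if f.contains q = false ∧ pvMatch q k = true then f.insert q v else f)
        found from rfl,
        pvCondFold_get? pvPats (by decide) found k v pat hmem]
      by_cases h : pvMatch pat k = true
      · cases hq : found.get? pat with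
        | some w =>
            have hc : found.contains pat = true := by
              rw [PySem.Dict.contains_eq_isSome_get?, hq]; rfl
            simp [hc]
        | none =>
            have hc : found.contains pat = false := by
              rw [PySem.Dict.contains_eq_isSome_get?, hq]; rfl
            simp [hc, h, pvFirst]
      · cases hq : found.get? pat <;> simp [h, pvFirst]

theorem get_basic_info_spec : Claim_equal_get_basic_info := by
  intro e _
  unfold Spec_get_basic_info get_basic_info get_basic_info_alt
  set d := PySem.Dict.ofList e with hd
  have hnd : d.keys.Nodup := PySem.Dict.nodup_keys_ofList e
  -- A's loop body inserts key None then possibly overwrites it: one insert of the joined value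
  have hstep : (fun (acc : PySem.Dict String (Option String)) (kp : String × String) =>
      let acc' := acc.insert kp.1 none
      match pvInnerA d kp.2 d.items with
      | some v => acc'.insert kp.1 v
      | none => acc') = fun acc kp => acc.insert kp.1 ((pvInnerA d kp.2 d.items).getD none) := by
    funext acc kp
    rcases h : pvInnerA d kp.2 d.items with _ | v <;>
      simp [PySem.Dict.insert_insert_self]
  simp only [hstep]
  -- A's fold inserts five fresh distinct keys into the empty dict: its items are the mapped zip
  rw [PySem.Dict.items_foldl_insert_fresh (pvKeys.zip pvPats) (fun kp => kp.1)
        (fun kp => (pvInnerA d kp.2 d.items).getD none) PySem.Dict.empty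
        (by decide) (by decide)]
  have hempty : (PySem.Dict.empty : PySem.Dict String (Option String)).items = [] := rfl
  rw [hempty, List.nil_append]
  -- entrywise: A's first-match value equals B's found-dict value
  apply List.map_congr_left
  intro kp hkp
  have hpat : kp.2 ∈ pvPats := (List.of_mem_zip hkp).2
  rw [pvInnerA_eq_pvFirst d kp.2 d.items hnd (fun _ h => h),
      PySem.Dict.getD_eq_get?_getD,
      pvFoldB_get? d.items PySem.Dict.empty kp.2 hpat]
  have hge : (PySem.Dict.empty : PySem.Dict String (Option String)).get? kp.2 = none := rfl
  rw [hge]
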